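-- pv_equiv track=rewrite | github.com/vallmeister/Programming | src/leetcode/1121_divide_array_into_increasing_sequences.py | canDivideIntoSubsequences
-- ===== SOURCE A (Python) =====
-- from typing import List
--
-- def canDivideIntoSubsequences(nums: List[int], k: int) -> bool:
--     prev = nums[0]
--     occ = 1
--     max_occ = len(nums) // k
--     for num in nums[1:]:
--         if num == prev:
--             occ += 1
--         else:
--             occ = 1
--             prev = num
--         if max_occ < occ:
--             return False
--     return True
-- ===== SOURCE B (Python) =====
-- from typing import List
--
-- def canDivideIntoSubsequences(nums: List[int], k: int) -> bool:
--     n = len(nums)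
--     cut = [i for i in range(1, n) if nums[i] != nums[i - 1]]
--     bounds = [0] + cut + [n]
--     return max(b - a for a, b in zip(bounds, bounds[1:])) <= n // k
-- ===== Notes on version B (the rewrite author's own statement) =====
-- stated objective: alternative
-- what changed: Replaces A's single pass with a running (prev, occ) counter checked against a precomputed threshold with early exit by a declarative staged computation: a comprehension collects the break indices where adjacent elements differ, the boundary list [0]+cut+[n] is formed, and one max over the pairwise differences of consecutive boundaries is compared against len(nums)//k.
-- intended difference: On one-element lists with k != 1, A returns True because it never checks the first run against len(nums)//k, while B returns False (len(nums)//k < 1 there), which is the intended answer since a single element cannot be divided as required. — e.g. on canDivideIntoSubsequences([5], 2): A returns true, B returns false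
import Mathlib
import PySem

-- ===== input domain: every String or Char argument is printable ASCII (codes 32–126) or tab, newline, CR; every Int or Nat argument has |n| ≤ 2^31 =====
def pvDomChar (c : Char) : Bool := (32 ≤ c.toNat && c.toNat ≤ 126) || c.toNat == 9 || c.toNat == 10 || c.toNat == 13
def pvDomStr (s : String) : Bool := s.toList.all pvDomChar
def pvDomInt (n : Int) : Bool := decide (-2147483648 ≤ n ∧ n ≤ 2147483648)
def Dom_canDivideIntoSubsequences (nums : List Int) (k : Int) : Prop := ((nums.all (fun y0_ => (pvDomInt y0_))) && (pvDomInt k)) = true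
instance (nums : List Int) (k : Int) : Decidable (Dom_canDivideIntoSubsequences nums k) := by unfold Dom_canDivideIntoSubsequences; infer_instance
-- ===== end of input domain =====

-- B replaces A's single-pass (prev, occ) counter with threshold and early exit by a declarative
-- staged computation: a comprehension collecting the break indices where adjacent elements differ,
-- boundary list [0]+cut+[n], and one max over the pairwise differences (objective: alternative).

-- ===== PORT A =====
-- A's for-loop over nums[1:] with state (prev, occ) and early return False
def goA (m prev occ : Int) : List Int → Bool
  | [] => true
  | num :: rest =>
    let s := if num = prev then (prev, occ + 1) else (num, (1 : Int))
    if m < s.2 then false else goA m s.1 s.2 rest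

def canDivideIntoSubsequences (nums : List Int) (k : Int) : Bool :=
  match nums with
  | [] => false  -- Python raises IndexError on nums[0] here; excluded by Pre_
  | prev :: tail => goA (PySem.Int.floordiv (PySem.List.len nums) k) prev 1 tail

-- ===== PORT B =====
-- cut = [i for i in range(1, n) if nums[i] != nums[i-1]]; bounds = [0]+cut+[n];
-- max(b - a for a, b in zip(bounds, bounds[1:])) <= n // k.  All indices in the
-- comprehension are in range, so pyGet? is exact; the max's generator is never
-- empty (bounds has ≥ 2 elements), so the none branch is unreachable.
def canDivideIntoSubsequences_alt (nums : List Int) (k : Int) : Bool :=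
  let n := PySem.List.len nums
  let cut := (PySem.List.pyRange 1 n 1).filter
      (fun i => decide (PySem.List.pyGet? nums i ≠ PySem.List.pyGet? nums (i - 1)))
  let bounds := (0 : Int) :: cut ++ [n]
  let gaps := (List.zip bounds bounds.tail).map (fun p => p.2 - p.1)
  match PySem.List.max? gaps (fun y => y) with
  | some m => decide (m ≤ PySem.Int.floordiv n k)
  | none => false  -- unreachable

-- ===== PRECONDITION & SPEC =====
-- Pre_ excludes exactly the inputs where A raises: empty nums (IndexError on nums[0]) and k = 0 (ZeroDivisionError).
def Pre_canDivideIntoSubsequences (nums : List Int) (k : Int) : Prop := nums ≠ [] ∧ k ≠ 0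
instance (nums : List Int) (k : Int) : Decidable (Pre_canDivideIntoSubsequences nums k) := by unfold Pre_canDivideIntoSubsequences; infer_instance
def pvWitness_canDivideIntoSubsequences : List Int × Int := ([2, 2, 3], 2)

-- On one-element lists with k ≠ 1 A never checks the first run and returns True even though
-- len(nums)//k < 1; B returns False there, the intended answer (a single element cannot form an
-- increasing subsequence of length determined by k > 1 or negative k).
def D_canDivideIntoSubsequences (nums : List Int) (k : Int) : Prop := nums.length = 1 ∧ k ≠ 1
instance (nums : List Int) (k : Int) : Decidable (D_canDivideIntoSubsequences nums k) := by unfold D_canDivideIntoSubsequences; infer_instance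
def Spec_canDivideIntoSubsequences (nums : List Int) (k : Int) (out : Bool) : Prop := ¬ D_canDivideIntoSubsequences nums k → out = canDivideIntoSubsequences_alt nums k
instance (nums : List Int) (k : Int) (out : Bool) : Decidable (Spec_canDivideIntoSubsequences nums k out) := by unfold Spec_canDivideIntoSubsequences; infer_instance
def pvDiffWitness_canDivideIntoSubsequences : List Int × Int := ([5], 2)
def pvDiffWitnessOut_canDivideIntoSubsequences : Bool × Bool := (true, false)

-- ===== CLAIM (what is proved, stated in full; the proofs are below) =====
def Claim_unchanged_canDivideIntoSubsequences : Prop := ∀ (nums : List Int) (k : Int), Dom_canDivideIntoSubsequences nums k → Pre_canDivideIntoSubsequences nums k → Spec_canDivideIntoSubsequences nums k (canDivideIntoSubsequences nums k)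
def Claim_changed_canDivideIntoSubsequences : Prop := Dom_canDivideIntoSubsequences (pvDiffWitness_canDivideIntoSubsequences.1) (pvDiffWitness_canDivideIntoSubsequences.2) ∧ Pre_canDivideIntoSubsequences (pvDiffWitness_canDivideIntoSubsequences.1) (pvDiffWitness_canDivideIntoSubsequences.2) ∧ D_canDivideIntoSubsequences (pvDiffWitness_canDivideIntoSubsequences.1) (pvDiffWitness_canDivideIntoSubsequences.2) ∧ canDivideIntoSubsequences (pvDiffWitness_canDivideIntoSubsequences.1) (pvDiffWitness_canDivideIntoSubsequences.2) = pvDiffWitnessOut_canDivideIntoSubsequences.1 ∧ canDivideIntoSubsequences_alt (pvDiffWitness_canDivideIntoSubsequences.1) (pvDiffWitness_canDivideIntoSubsequences.2) = pvDiffWitnessOut_canDivideIntoSubsequences.2 ∧ pvDiffWitnessOut_canDivideIntoSubsequences.1 ≠ pvDiffWitnessOut_canDivideIntoSubsequences.2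
def Claim_exact_canDivideIntoSubsequences : Prop := ∀ (nums : List Int) (k : Int), Dom_canDivideIntoSubsequences nums k → Pre_canDivideIntoSubsequences nums k → D_canDivideIntoSubsequences nums k → canDivideIntoSubsequences nums k ≠ canDivideIntoSubsequences_alt nums k

-- ===== LEMMAS AND PROOFS =====

-- length of the maximal prefix of equal elements x
def countRun (x : Int) : List Int → Nat
  | [] => 0
  | y :: ys => if y = x then countRun x ys + 1 else 0

-- reference: length of the longest run of equal consecutive elements
def longestRun : List Int → Int
  | [] => 0
  | x :: xs => max (1 + (countRun x xs : Int)) (longestRun (xs.drop (countRun x xs)))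
termination_by l => l.length
decreasing_by simp

theorem longestRun_nil : longestRun [] = 0 := by simp [longestRun]

theorem longestRun_cons (x : Int) (xs : List Int) :
    longestRun (x :: xs) = max (1 + (countRun x xs : Int)) (longestRun (xs.drop (countRun x xs))) := by
  rw [longestRun.eq_def]

theorem longestRun_nonneg : ∀ l, 0 ≤ longestRun l := by
  intro l
  induction hf : l.length using Nat.strong_induction_on generalizing l with
  | _ f ih =>
    cases l with
    | nil => simp [longestRun_nil]
    | cons x xs =>
      have h := ih ((xs.drop (countRun x xs)).length) (by subst hf; simp) _ rfl
      rw [longestRun_cons]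
      omega

theorem longestRun_pos (l : List Int) (h : l ≠ []) : 1 ≤ longestRun l := by
  cases l with
  | nil => exact absurd rfl h
  | cons x xs =>
    have := longestRun_nonneg (xs.drop (countRun x xs))
    rw [longestRun_cons]
    omega

theorem goA_eq (m : Int) : ∀ (l : List Int) (p c : Int), 1 ≤ c → c ≤ m →
    goA m p c l = decide (c + (countRun p l : Int) ≤ m ∧ longestRun (l.drop (countRun p l)) ≤ m) := by
  intro l
  induction l with
  | nil =>
    intro p c h1 hc
    simp only [goA, countRun, List.drop_nil, longestRun_nil, Nat.cast_zero]
    symm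
    simp only [decide_eq_true_eq]
    exact ⟨by omega, by omega⟩
  | cons y ys ih =>
    intro p c h1 hc
    by_cases hyp : y = p
    · subst hyp
      by_cases hlt : m < c + 1
      · simp only [goA, countRun]
        simp [hlt]
        intro hh
        exfalso
        omega
      · rw [show goA m y c (y :: ys) = goA m y (c + 1) ys by simp [goA, hlt]]
        rw [ih y (c + 1) (by omega) (by omega)]
        simp only [countRun, if_pos rfl, List.drop_succ_cons]
        congr 1
        rw [eq_iff_iff]
        push_cast
        constructor <;> rintro ⟨ha, hb⟩ <;> exact ⟨by omega, hb⟩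
    · by_cases hm1 : m < 1
      · have hpos := longestRun_pos (y :: ys) (by simp)
        have hnot : ¬ (longestRun (y :: ys) ≤ m) := by omega
        simp [goA, countRun, hyp, hm1, hnot]
      · rw [show goA m p c (y :: ys) = goA m y 1 ys by simp [goA, hyp, hm1]]
        rw [ih y 1 (by omega) (by omega)]
        simp only [countRun, if_neg hyp, Nat.cast_zero, List.drop_zero]
        rw [eq_comm]
        simp only [decide_eq_decide]
        rw [longestRun_cons]
        omega

-- recursive characterisation of B's break-index comprehension
def cutsRec (prev i : Int) : List Int → List Int
  | [] => []
  | y :: ys => if y ≠ prev then i :: cutsRec y (i + 1) ys else cutsRec y (i + 1) ys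

theorem cut_eq (nums : List Int) : ∀ (j : Nat), 1 ≤ j → j ≤ nums.length →
    (PySem.List.pyRange (j : Int) (nums.length : Int) 1).filter
        (fun i => decide (PySem.List.pyGet? nums i ≠ PySem.List.pyGet? nums (i - 1)))
      = cutsRec (nums.getD (j - 1) 0) (j : Int) (nums.drop j) := by
  intro j
  induction hf : nums.length - j generalizing j with
  | zero =>
    intro hj1 hj
    rw [PySem.List.pyRange_one_eq_nil (by omega)]
    rw [List.drop_eq_nil_of_le (by omega)]
    rfl
  | succ f ih =>
    intro hj1 hj
    have hjl : j < nums.length := by omega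
    rw [PySem.List.pyRange_one_cons (by push_cast; omega)]
    rw [List.filter_cons]
    have hg1 : PySem.List.pyGet? nums (j : Int) = some nums[j] := by
      simp [PySem.List.pyGet?_natCast, hjl]
    have hg2 : PySem.List.pyGet? nums ((j : Int) - 1) = some nums[j - 1] := by
      have h1 : ((j : Int) - 1) = ((j - 1 : Nat) : Int) := by omega
      rw [h1]
      simp [List.getElem?_eq_getElem (show j - 1 < nums.length by omega)]
    have hdrop : nums.drop j = nums[j] :: nums.drop (j + 1) := List.drop_eq_getElem_cons hjl
    have hrec := ih (j + 1) (by omega) (by omega) (by omega)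
    have hgd : nums.getD (j + 1 - 1) 0 = nums[j] := by
      have hlt : j < nums.length := hjl
      simp [List.getD, List.getElem?_eq_getElem hlt]
    rw [hgd] at hrec
    push_cast at hrec
    have hgd' : nums.getD (j - 1) 0 = nums[j - 1] := by
      have hlt : j - 1 < nums.length := by omega
      simp [List.getD, List.getElem?_eq_getElem hlt]
    rw [hdrop, hgd']
    by_cases hne : nums[j] = nums[j - 1]
    · rw [if_neg (by simp [hg1, hg2, hne])]
      rw [show cutsRec nums[j - 1] (j : Int) (nums[j] :: nums.drop (j + 1))
          = cutsRec nums[j] ((j : Int) + 1) (nums.drop (j + 1)) by simp [cutsRec, hne]]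
      exact hrec
    · rw [if_pos (by simp [hg1, hg2, hne])]
      rw [show cutsRec nums[j - 1] (j : Int) (nums[j] :: nums.drop (j + 1))
          = (j : Int) :: cutsRec nums[j] ((j : Int) + 1) (nums.drop (j + 1)) by simp [cutsRec, hne]]
      rw [hrec]

-- maximum gap between consecutive boundaries, starting from b
def mg (b : Int) : List Int → Int
  | [] => 0
  | [c] => c - b
  | c :: c' :: cs => max (c - b) (mg c (c' :: cs))

theorem foldl_max_init (t : List Int) : ∀ a h : Int, t.foldl max (max a h) = max a (t.foldl max h) := by
  induction t with
  | nil => intro a h; rfl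
  | cons x xs ih =>
    intro a h
    simp only [List.foldl_cons]
    rw [max_assoc, ih]

theorem maxZip (l : List Int) : ∀ b : Int, l ≠ [] →
    PySem.List.max? ((List.zip (b :: l) l).map (fun p => p.2 - p.1)) (fun y => y)
      = some (mg b l) := by
  induction l with
  | nil => intro b h; exact absurd rfl h
  | cons c cs ih =>
    intro b _
    cases cs with
    | nil =>
      simp [List.zip, PySem.List.max?_id_cons, mg]
    | cons c' cs' =>
      have hih := ih c (by simp)
      have hzip : List.zip (b :: c :: c' :: cs') (c :: c' :: cs')
          = (b, c) :: List.zip (c :: c' :: cs') (c' :: cs') := by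
        simp [List.zip]
      rw [hzip, List.map_cons]
      have hred : (((b, c).2 - (b, c).1 : Int)) = c - b := rfl
      rw [hred]
      have hMne : (List.zip (c :: c' :: cs') (c' :: cs')).map (fun p => (p.2 - p.1 : Int))
          = (c' - c) :: (List.zip (c' :: cs') cs').map (fun p => p.2 - p.1) := by
        simp [List.zip]
      rw [hMne]
      rw [hMne] at hih
      rw [PySem.List.max?_id_cons] at hih ⊢
      have hv := Option.some.inj hih
      rw [show mg b (c :: c' :: cs') = max (c - b) (mg c (c' :: cs')) from rfl, ← hv]
      rw [List.foldl_cons, foldl_max_init]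

theorem mg_eq (l : List Int) : ∀ (prev i b : Int), b + 1 ≤ i →
    mg b (cutsRec prev i l ++ [i + (l.length : Int)])
      = max ((i - b) + (countRun prev l : Int)) (longestRun (l.drop (countRun prev l))) := by
  induction l with
  | nil =>
    intro prev i b hb
    simp [cutsRec, countRun, mg, longestRun_nil]
    omega
  | cons y ys ih =>
    intro prev i b hb
    rw [show i + (((y :: ys).length : Nat) : Int) = (i + 1) + (ys.length : Int) by
      push_cast [List.length_cons]; ring]
    by_cases hyp : y = prev
    · subst hyp
      rw [show cutsRec y i (y :: ys) = cutsRec y (i + 1) ys by simp [cutsRec]]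
      rw [ih y (i + 1) b (by omega)]
      rw [show countRun y (y :: ys) = countRun y ys + 1 by simp [countRun]]
      rw [List.drop_succ_cons]
      push_cast
      omega
    · rw [show cutsRec prev i (y :: ys) = i :: cutsRec y (i + 1) ys by simp [cutsRec, hyp]]
      rw [show countRun prev (y :: ys) = 0 by simp [countRun, hyp]]
      simp only [Nat.cast_zero, List.drop_zero]
      rw [longestRun_cons, List.cons_append]
      have hmg : mg b (i :: (cutsRec y (i + 1) ys ++ [(i + 1) + (ys.length : Int)]))
          = max (i - b) (mg i (cutsRec y (i + 1) ys ++ [(i + 1) + (ys.length : Int)])) := by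
        cases hcc : cutsRec y (i + 1) ys ++ [(i + 1) + (ys.length : Int)] with
        | nil => exact absurd hcc (by simp)
        | cons z zs => simp [mg]
      rw [hmg, ih y (i + 1) i (by omega)]
      omega

theorem alt_eq (nums : List Int) (k : Int) (hne : nums ≠ []) :
    canDivideIntoSubsequences_alt nums k
      = decide (longestRun nums ≤ PySem.Int.floordiv (nums.length : Int) k) := by
  cases nums with
  | nil => exact absurd rfl hne
  | cons x xs =>
    unfold canDivideIntoSubsequences_alt
    simp only [PySem.List.len_eq]
    have hcut := cut_eq (x :: xs) 1 le_rfl (by simp)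
    simp only [Nat.cast_one] at hcut
    rw [show (x :: xs).getD (1 - 1) 0 = x from rfl,
        show List.drop 1 (x :: xs) = xs from rfl] at hcut
    rw [hcut]
    simp only [List.cons_append, List.tail_cons]
    rw [maxZip (cutsRec x 1 xs ++ [(((x :: xs).length : Nat) : Int)]) 0 (by simp)]
    show decide (mg 0 (cutsRec x 1 xs ++ [(((x :: xs).length : Nat) : Int)])
        ≤ PySem.Int.floordiv (((x :: xs).length : Nat) : Int) k)
      = decide (longestRun (x :: xs) ≤ PySem.Int.floordiv (((x :: xs).length : Nat) : Int) k)
    have hmg := mg_eq xs x 1 0 (by omega)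
    rw [show (1 : Int) + (xs.length : Int) = (((x :: xs).length : Nat) : Int) by
      push_cast [List.length_cons]; ring] at hmg
    rw [hmg, longestRun_cons]
    simp only [decide_eq_decide]
    omega

theorem fdiv_one_nonpos (k : Int) (hk0 : k ≠ 0) (hk1 : k ≠ 1) :
    PySem.Int.floordiv 1 k ≤ 0 := by
  rcases lt_trichotomy k 0 with hneg | hz | hpos
  · have hmod := PySem.Int.mod_neg_bounds 1 hneg
    have heq := PySem.Int.floordiv_mul_add_mod 1 k
    set q := PySem.Int.floordiv 1 k
    set r := PySem.Int.mod 1 k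
    by_contra h
    have hq : 1 ≤ q := by omega
    nlinarith
  · exact absurd hz hk0
  · have h2 : 2 ≤ k := by omega
    rw [PySem.Int.floordiv_eq_ediv_of_pos (show (0:Int) < k by omega)]
    have := Int.ediv_eq_zero_of_lt (by omega : (0:Int) ≤ 1) (by omega : (1:Int) < k)
    omega

-- ===== VERDICT (by name: the statement is the Claim_ definition above) =====
theorem canDivideIntoSubsequences_spec : Claim_unchanged_canDivideIntoSubsequences := by
  intro nums k hdom hpre hnd
  obtain ⟨hne, hk0⟩ := hpre
  cases nums with
  | nil => exact absurd rfl hne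
  | cons x xs =>
    rw [alt_eq _ _ (by simp)]
    set m := PySem.Int.floordiv ((x :: xs).length : Int) k with hm
    show canDivideIntoSubsequences (x :: xs) k = decide (longestRun (x :: xs) ≤ m)
    unfold canDivideIntoSubsequences
    simp only [PySem.List.len_eq]
    rw [← hm]
    by_cases h1m : 1 ≤ m
    · rw [goA_eq m xs x 1 le_rfl h1m]
      rw [longestRun_cons]
      simp only [decide_eq_decide]
      omega
    · cases xs with
      | nil =>
        exfalso
        have hk1 : k = 1 := by
          by_contra hk1
          exact hnd ⟨rfl, hk1⟩
        subst hk1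
        have hm1 : m = 1 := by
          rw [hm]
          norm_num
        omega
      | cons y ys =>
        have hpos := longestRun_pos (x :: y :: ys) (by simp)
        have hB : ¬ (longestRun (x :: y :: ys) ≤ m) := by omega
        simp only [hB, decide_false]
        unfold goA
        by_cases hxy : y = x <;> simp [hxy] <;> omega

theorem canDivideIntoSubsequences_changed : Claim_changed_canDivideIntoSubsequences := by
  unfold Claim_changed_canDivideIntoSubsequences
  refine ⟨by decide, by decide, by decide, by decide, ?_, by decide⟩
  show canDivideIntoSubsequences_alt [5] 2 = false
  rw [alt_eq _ _ (by simp)]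
  have h1 : longestRun [(5 : Int)] = 1 := by
    rw [longestRun_cons]
    simp [countRun, longestRun_nil]
  simp only [h1, List.length_cons, List.length_nil, Nat.cast_one]
  decide

theorem canDivideIntoSubsequences_tight : Claim_exact_canDivideIntoSubsequences := by
  intro nums k hdom hpre hd
  obtain ⟨hlen, hk1⟩ := hd
  obtain ⟨-, hk0⟩ := hpre
  cases nums with
  | nil => simp at hlen
  | cons x xs =>
    cases xs with
    | cons y ys => simp at hlen
    | nil =>
      have hA : canDivideIntoSubsequences [x] k = true := by
        unfold canDivideIntoSubsequences goA; rfl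
      have hB : canDivideIntoSubsequences_alt [x] k = false := by
        rw [alt_eq _ _ (by simp)]
        have hLR : longestRun [x] = 1 := by
          rw [longestRun_cons]
          simp [countRun, longestRun_nil]
        have hdiv := fdiv_one_nonpos k hk0 hk1
        simp only [hLR, List.length_cons, List.length_nil]
        norm_num
        omega
      rw [hA, hB]
      simp
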